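-- pv_equiv track=rewrite | github.com/M6stafa/intro-bio-hw | P17.py | get_auxiliaries
-- ===== SOURCE A (Python) =====
-- def get_auxiliaries(table):
--     first_occurrences = {}
--     counts = { '$': [0], 'A': [0], 'T': [0], 'C': [0], 'G': [0] }
--     total_counts = { '$': 0, 'A': 0, 'T': 0, 'C': 0, 'G': 0 }
--     last_column = []
--
--     for row, text in enumerate(table):
--         if text[0] not in first_occurrences.keys():
--             first_occurrences[text[0]] = row
--
--         total_counts[text[-1]] += 1
--         for symbol in counts.keys():
--             counts[symbol].append(total_counts[symbol])
--
--         last_column.append(text[-1])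
--
--     return first_occurrences, counts, last_column
-- ===== SOURCE B (Python) =====
-- def get_auxiliaries(table):
--     # Phase 1: one pass builds first_occurrences and the last column.
--     first_occurrences = {}
--     last_column = []
--     for row, text in enumerate(table):
--         first_occurrences.setdefault(text[0], row)
--         last_column.append(text[-1])
--     # Phase 2: per-symbol prefix sums over the finished last column.
--     counts = {}
--     for s in '$ATCG':
--         acc = [0]
--         c = 0
--         for ch in last_column:
--             c += (ch == s)
--             acc.append(c)
--         counts[s] = acc
--     return first_occurrences, counts, last_column
-- ===== Notes on version B (the rewrite author's own statement) =====
-- stated objective: alternative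
-- what changed: Instead of A's interleaved per-row loop that updates a running tally dict and appends to all five count lists inside the row loop, B builds first_occurrences and the last column in one simple pass and then computes each symbol's count list as a separate prefix-sum over the finished last column.
import Mathlib
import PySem

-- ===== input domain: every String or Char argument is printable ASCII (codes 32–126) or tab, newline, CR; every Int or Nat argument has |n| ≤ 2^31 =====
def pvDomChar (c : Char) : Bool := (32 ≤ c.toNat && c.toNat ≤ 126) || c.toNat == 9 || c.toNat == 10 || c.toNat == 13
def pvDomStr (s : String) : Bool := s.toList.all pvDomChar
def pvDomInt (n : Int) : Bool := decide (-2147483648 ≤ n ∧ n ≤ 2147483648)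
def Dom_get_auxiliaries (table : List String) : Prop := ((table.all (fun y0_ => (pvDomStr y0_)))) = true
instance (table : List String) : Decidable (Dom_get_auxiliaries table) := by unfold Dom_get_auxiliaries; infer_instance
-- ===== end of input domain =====

-- B replaces A's interleaved tally/append row loop by one simple pass plus per-symbol
-- prefix sums over the finished last column (objective: alternative decomposition).

-- ===== PORT A =====
-- text[0] / text[-1]: PySem.Str.pyGet?; under Pre_ the strings are nonempty, so the
-- '?' default is never taken; Python's single-char string s[i] becomes String.mk [c].
def pvHead (t : String) : String := String.mk [(PySem.Str.pyGet? t 0).getD '?']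
def pvLast (t : String) : String := String.mk [(PySem.Str.pyGet? t (-1)).getD '?']

-- total_counts[text[-1]] += 1 : under Pre_ the key is present, so getD-then-insert
-- (overwrite keeps position) is exact; likewise counts[symbol].append via modify.
def pvStepA (st : (PySem.Dict String Int) × (PySem.Dict String (List Int)) × (PySem.Dict String Int) × List String)
    (p : Int × String) : (PySem.Dict String Int) × (PySem.Dict String (List Int)) × (PySem.Dict String Int) × List String :=
  let (fo, cnts, tc, last) := st
  let c0 := pvHead p.2
  let fo := if fo.contains c0 then fo else fo.insert c0 p.1
  let cl := pvLast p.2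
  let tc := tc.insert cl (tc.getD cl 0 + 1)
  let cnts := cnts.keys.foldl (fun d s => d.modify s [] (fun l => l ++ [tc.getD s 0])) cnts
  (fo, cnts, tc, last ++ [cl])

def get_auxiliaries (table : List String) : (List (String × Int)) × (List (String × List Int)) × List String :=
  let st := (PySem.List.enumerate table 0).foldl pvStepA
    (PySem.Dict.empty,
     PySem.Dict.ofList [("$", [(0:Int)]), ("A", [0]), ("T", [0]), ("C", [0]), ("G", [0])],
     PySem.Dict.ofList [("$", (0:Int)), ("A", 0), ("T", 0), ("C", 0), ("G", 0)],
     [])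
  (st.1.items, st.2.1.items, st.2.2.2)

-- ===== PORT B =====
-- phase 1: first_occurrences (setdefault) and last_column in one pass
def pvStepB (st : (PySem.Dict String Int) × List String) (p : Int × String) :
    (PySem.Dict String Int) × List String :=
  (st.1.setdefault (pvHead p.2) p.1, st.2 ++ [pvLast p.2])

-- phase 2: prefix sums 'acc = [0]; c += (ch == s); acc.append(c)' over last_column
def pvPrefix (s : String) (last : List String) : List Int :=
  (last.foldl (fun (st : List Int × Int) ch =>
      let c := st.2 + (if ch = s then 1 else 0); (st.1 ++ [c], c)) ([0], 0)).1

def get_auxiliaries_alt (table : List String) : (List (String × Int)) × (List (String × List Int)) × List String :=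
  let st := (PySem.List.enumerate table 0).foldl pvStepB (PySem.Dict.empty, [])
  (st.1.items, ["$", "A", "T", "C", "G"].map (fun s => (s, pvPrefix s st.2)), st.2)

-- ===== PRECONDITION & SPEC =====
-- Pre_: exactly where A returns — every row nonempty (else IndexError on text[0]/text[-1])
-- with its last character one of $,A,T,C,G (else KeyError on total_counts[text[-1]]).
def Pre_get_auxiliaries (table : List String) : Prop :=
  ∀ t ∈ table, t.toList.getLast? ∈ ((['$', 'A', 'T', 'C', 'G'] : List Char).map some)
instance (table : List String) : Decidable (Pre_get_auxiliaries table) := by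
  unfold Pre_get_auxiliaries; infer_instance
def pvWitness_get_auxiliaries : List String := ["AT$", "T$A"]


def Spec_get_auxiliaries (table : List String) (out : (List (String × Int)) × (List (String × List Int)) × List String) : Prop := out = get_auxiliaries_alt table
instance (table : List String) (out : (List (String × Int)) × (List (String × List Int)) × List String) : Decidable (Spec_get_auxiliaries table out) := by unfold Spec_get_auxiliaries; infer_instance

-- ===== CLAIM (what is proved, stated in full; the proofs are below) =====
def Claim_equal_get_auxiliaries : Prop := ∀ (table : List String), Dom_get_auxiliaries table → Pre_get_auxiliaries table → Spec_get_auxiliaries table (get_auxiliaries table)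

-- ===== LEMMAS AND PROOFS =====

-- mathematical descriptions of the fold states (proof-side only)
def pvLastCol (table : List String) : List String := table.map pvLast

def pvFo (table : List String) : PySem.Dict String Int :=
  (PySem.List.enumerate table 0).foldl
    (fun d p => if d.contains (pvHead p.2) then d else d.insert (pvHead p.2) p.1) PySem.Dict.empty

def pvPfx (s : String) (l : List String) : List Int :=
  (List.range (l.length + 1)).map (fun i => ((l.take i).count s : Int))

def pvTc (l : List String) : PySem.Dict String Int :=
  PySem.Dict.mk [("$", l.count "$"), ("A", l.count "A"), ("T", l.count "T"),
                 ("C", l.count "C"), ("G", l.count "G")]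

def pvCnts (l : List String) : PySem.Dict String (List Int) :=
  PySem.Dict.mk [("$", pvPfx "$" l), ("A", pvPfx "A" l), ("T", pvPfx "T" l),
                 ("C", pvPfx "C" l), ("G", pvPfx "G" l)]

lemma pvPfx_append (s : String) (l : List String) (x : String) :
    pvPfx s (l ++ [x]) = pvPfx s l ++ [((l ++ [x]).count s : Int)] := by
  unfold pvPfx
  rw [List.length_append, List.length_singleton, List.range_succ, List.map_append]
  congr 1
  · apply List.map_congr_left
    intro i hi
    simp only [List.mem_range] at hi
    rw [List.take_append_of_le_length (by omega)]
  · rw [List.map_singleton, List.take_of_length_le (by simp)]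

lemma pvTc_step (L : List String) (x : String)
    (hx : x ∈ (["$", "A", "T", "C", "G"] : List String)) :
    (pvTc L).insert x ((pvTc L).getD x 0 + 1) = pvTc (L ++ [x]) := by
  fin_cases hx <;>
    simp [pvTc, PySem.Dict.insert, PySem.Dict.getD, PySem.Dict.get?, List.count_append]

lemma pvCnts_step (L : List String) (x : String) :
    (["$", "A", "T", "C", "G"] : List String).foldl
      (fun d s => d.modify s [] (fun l => l ++ [(pvTc (L ++ [x])).getD s 0])) (pvCnts L)
      = pvCnts (L ++ [x]) := by
  simp [pvTc, pvCnts, PySem.Dict.modify, PySem.Dict.insert, PySem.Dict.getD,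
        PySem.Dict.get?, pvPfx_append]

lemma pvFo_append (l : List String) (t : String) :
    pvFo (l ++ [t]) =
      (if (pvFo l).contains (pvHead t) then pvFo l
       else (pvFo l).insert (pvHead t) (0 + l.length)) := by
  unfold pvFo
  rw [PySem.List.enumerate_append, List.foldl_append]
  simp only [PySem.List.enumerate_cons, PySem.List.enumerate_nil, List.foldl_cons, List.foldl_nil]

lemma pvFoldA (table : List String) (h : Pre_get_auxiliaries table) :
    (PySem.List.enumerate table 0).foldl pvStepA
      (PySem.Dict.empty,
       PySem.Dict.ofList [("$", [(0:Int)]), ("A", [0]), ("T", [0]), ("C", [0]), ("G", [0])],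
       PySem.Dict.ofList [("$", (0:Int)), ("A", 0), ("T", 0), ("C", 0), ("G", 0)],
       [])
      = (pvFo table, pvCnts (pvLastCol table), pvTc (pvLastCol table), pvLastCol table) := by
  induction table using List.reverseRecOn with
  | nil => decide
  | append_singleton l t ih =>
    have hl : Pre_get_auxiliaries l := fun u hu => h u (List.mem_append_left _ hu)
    obtain ⟨c, hc, hlast⟩ := List.mem_map.mp (h t (by simp))
    have hlv : pvLast t = String.mk [c] := by
      simp [pvLast, PySem.Str.pyGet?, PySem.List.pyGet?_neg_one, ← hlast]
    rw [PySem.List.enumerate_append, List.foldl_append, ih hl]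
    simp only [PySem.List.enumerate_cons, PySem.List.enumerate_nil, List.foldl_cons, List.foldl_nil]
    unfold pvStepA
    have hlcol : pvLastCol (l ++ [t]) = pvLastCol l ++ [pvLast t] := by simp [pvLastCol]
    have hkeys : (pvCnts (pvLastCol l)).keys = ["$", "A", "T", "C", "G"] := by
      simp [pvCnts, PySem.Dict.keys]
    simp only [hkeys, hlcol, hlv, pvFo_append]
    have hx : String.mk [c] ∈ (["$", "A", "T", "C", "G"] : List String) := by
      fin_cases hc <;> decide
    rw [pvTc_step _ _ hx, pvCnts_step]

lemma pvFoldB (table : List String) :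
    (PySem.List.enumerate table 0).foldl pvStepB (PySem.Dict.empty, [])
      = (pvFo table, pvLastCol table) := by
  induction table using List.reverseRecOn with
  | nil => rfl
  | append_singleton l t ih =>
    rw [PySem.List.enumerate_append, List.foldl_append, ih]
    simp only [PySem.List.enumerate_cons, PySem.List.enumerate_nil, List.foldl_cons, List.foldl_nil]
    unfold pvStepB
    rw [pvFo_append]
    have hlcol : pvLastCol (l ++ [t]) = pvLastCol l ++ [pvLast t] := by simp [pvLastCol]
    by_cases hcon : (pvFo l).contains (pvHead t)
    · simp [PySem.Dict.setdefault_of_contains, hcon, hlcol]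
    · simp [PySem.Dict.setdefault_of_not_contains, hcon, hlcol]

lemma pvPrefix_state (s : String) (l : List String) :
    (l.foldl (fun (st : List Int × Int) ch =>
        let c := st.2 + (if ch = s then 1 else 0); (st.1 ++ [c], c)) ([0], 0))
      = (pvPfx s l, (l.count s : Int)) := by
  induction l using List.reverseRecOn with
  | nil => simp [pvPfx]
  | append_singleton l x ih =>
    rw [List.foldl_append, ih]
    simp only [List.foldl_cons, List.foldl_nil]
    have hcount : ((l ++ [x]).count s : Int) = (l.count s : Int) + (if x = s then 1 else 0) := by
      by_cases hxs : x = s <;> simp [List.count_append, hxs]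
    rw [pvPfx_append, hcount]

lemma pvPrefix_eq (s : String) (l : List String) : pvPrefix s l = pvPfx s l := by
  unfold pvPrefix
  rw [pvPrefix_state]

-- ===== VERDICT (by name: the statement is the Claim_ definition above) =====
theorem get_auxiliaries_spec : Claim_equal_get_auxiliaries := by
  intro table _ hpre
  unfold Spec_get_auxiliaries get_auxiliaries get_auxiliaries_alt
  rw [pvFoldA table hpre, pvFoldB table]
  simp only [pvPrefix_eq, pvCnts, List.map_cons, List.map_nil]
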